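-- pv_equiv track=rewrite | github.com/matthematics/schubmult | src/schubmult/schub_lib/tests/legacy_perm_lib.py | elem_sym_perms_op
-- ===== SOURCE A (Python) =====
-- def getpermval(perm, index):
--     if index < len(perm):
--         return perm[index]
--     return index + 1
--
-- def permtrim(perm):
--     L = len(perm)
--     while L > 2 and perm[-1] == L:
--         L = perm.pop() - 1
--     return perm
--
-- def has_bruhat_descent(perm, i, j):
--     if perm[i] < perm[j]:
--         return False
--     for p in range(i + 1, j):
--         if perm[i] > perm[p] and perm[p] > perm[j]:
--             return False
--     return True
--
-- def elem_sym_perms_op(orig_perm, p, k):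
--     total_list = [(orig_perm, 0)]
--     up_perm_list = [(orig_perm, k)]
--     for pp in range(p):
--         perm_list = []
--         for up_perm, last in up_perm_list:
--             up_perm2 = [*up_perm]
--             if len(up_perm2) < k + 1:
--                 up_perm2 += [i + 1 for i in range(len(up_perm2), k + 2)]
--             pos_list = [i for i in range(k) if getpermval(up_perm2, i) == getpermval(orig_perm, i)]
--             for j in range(last, len(up_perm2)):
--                 for i in pos_list:
--                     if has_bruhat_descent(up_perm2, i, j):
--                         new_perm = [*up_perm2]
--                         new_perm[i], new_perm[j] = new_perm[j], new_perm[i]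
--                         new_perm_add = tuple(permtrim(new_perm))
--                         perm_list += [(new_perm_add, j)]
--                         total_list += [(new_perm_add, pp + 1)]
--         up_perm_list = perm_list
--     return total_list
-- ===== SOURCE B (Python) =====
-- def elem_sym_perms_op(orig_perm, p, k):
--     # level-by-level BFS; covers found per j by one right-to-left scan tracking the
--     # minimum intermediate value above u[j], instead of re-scanning the window per i.
--     def trim(w):
--         L = len(w)
--         while L > 2 and w[L - 1] == L:
--             L -= 1
--         return tuple(w[:L])
--
--     def covers(up_perm, last):
--         u = list(up_perm)
--         if len(u) < k + 1:
--             u.extend(range(len(u) + 1, k + 3))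
--         n = len(orig_perm)
--         pos = {i for i in range(k)
--                if u[i] == (orig_perm[i] if i < n else i + 1)}
--         if not pos:
--             return []
--         out = []
--         for j in range(last, len(u)):
--             vj = u[j]
--             m = None          # min value strictly above vj seen between i and j
--             hits = []
--             for i in range(j - 1, -1, -1):
--                 vi = u[i]
--                 if i in pos and vj <= vi and (m is None or vi <= m):
--                     hits.append(i)
--                 if vj < vi and (m is None or vi < m):
--                     m = vi
--             for i in reversed(hits):
--                 w = list(u)
--                 w[i], w[j] = w[j], w[i]
--                 out.append((trim(w), j))
--         return out
--
--     total = [(orig_perm, 0)]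
--     level = [(orig_perm, k)]
--     for t in range(p):
--         level = [c for pair in level for c in covers(*pair)]
--         total.extend((perm, t + 1) for perm, _ in level)
--     return total
-- ===== Notes on version B (the rewrite author's own statement) =====
-- stated objective: alternative
-- what changed: Per column j, covers are found by one right-to-left scan tracking the minimum intermediate value above u[j] (replacing the per-i window re-scan of has_bruhat_descent), and the result list is assembled level by level instead of threading two accumulators through triply nested loops.
import Mathlib
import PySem

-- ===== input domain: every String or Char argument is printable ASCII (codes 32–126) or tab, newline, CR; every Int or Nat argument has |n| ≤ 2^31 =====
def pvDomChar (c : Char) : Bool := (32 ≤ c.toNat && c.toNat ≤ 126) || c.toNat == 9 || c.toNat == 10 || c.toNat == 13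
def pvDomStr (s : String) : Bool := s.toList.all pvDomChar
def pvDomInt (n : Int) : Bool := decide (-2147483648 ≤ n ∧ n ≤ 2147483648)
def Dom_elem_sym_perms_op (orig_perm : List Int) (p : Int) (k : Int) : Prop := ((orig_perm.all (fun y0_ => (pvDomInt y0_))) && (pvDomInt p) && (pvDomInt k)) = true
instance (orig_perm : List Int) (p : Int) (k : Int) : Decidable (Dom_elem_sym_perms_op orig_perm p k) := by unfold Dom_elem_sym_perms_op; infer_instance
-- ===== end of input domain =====

-- B replaces the per-i window re-scan of has_bruhat_descent by one right-to-left
-- min-tracking scan per column j, and assembles the totals level by level.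
-- Note: Python A mutates its local copies only; the returned value is what is compared.

-- ===== PORT A =====
def pvGetpermval (perm : List Int) (index : Int) : Int :=
  if index < PySem.List.len perm then PySem.List.pyGetD perm index 0
  else index + 1

def pvPermtrim (perm : List Int) : List Int :=
  if _h : 2 < perm.length ∧ PySem.List.pyGetD perm (-1) 0 = (perm.length : Int)
  then pvPermtrim perm.dropLast
  else perm
termination_by perm.length
decreasing_by simp [List.length_dropLast]; omega

def pvHBD (perm : List Int) (i j : Int) : Bool :=
  if PySem.List.pyGetD perm i 0 < PySem.List.pyGetD perm j 0 then false
  else (PySem.List.pyRange (i + 1) j 1).all (fun q =>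
    !(decide (PySem.List.pyGetD perm q 0 < PySem.List.pyGetD perm i 0) &&
      decide (PySem.List.pyGetD perm j 0 < PySem.List.pyGetD perm q 0)))

def pvStepA (orig_perm : List Int) (k : Int) (pp : Int)
    (acc : List (List Int × Int) × List (List Int × Int)) (entry : List Int × Int) :
    List (List Int × Int) × List (List Int × Int) :=
  let up_perm := entry.1
  let last := entry.2
  let up_perm2 := if PySem.List.len up_perm < k + 1
    then up_perm ++ (PySem.List.pyRange (PySem.List.len up_perm) (k + 2) 1).map (fun i => i + 1)
    else up_perm
  let pos_list := (PySem.List.pyRange 0 k 1).filter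
      (fun i => pvGetpermval up_perm2 i == pvGetpermval orig_perm i)
  (PySem.List.pyRange last (PySem.List.len up_perm2) 1).foldl (fun acc2 j =>
    pos_list.foldl (fun acc3 i =>
      if pvHBD up_perm2 i j then
        let new_perm := PySem.List.pySetD
          (PySem.List.pySetD up_perm2 i (PySem.List.pyGetD up_perm2 j 0)) j
          (PySem.List.pyGetD up_perm2 i 0)
        let npa := pvPermtrim new_perm
        (acc3.1 ++ [(npa, pp + 1)], acc3.2 ++ [(npa, j)])
      else acc3) acc2) acc

def elem_sym_perms_op (orig_perm : List Int) (p : Int) (k : Int) : List (List Int × Int) :=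
  ((PySem.List.pyRange 0 p 1).foldl
    (fun st pp => st.2.foldl (pvStepA orig_perm k pp) (st.1, []))
    ([(orig_perm, 0)], [(orig_perm, k)])).1

-- ===== PORT B =====
def pvTrimLen (w : List Int) (L : Nat) : Nat :=
  if h : 2 < L ∧ w.getD (L - 1) 0 = (L : Int) then pvTrimLen w (L - 1) else L
termination_by L
decreasing_by omega

def pvTrim (w : List Int) : List Int := w.take (pvTrimLen w w.length)

def pvUpd (vj : Int) (m : Option Int) (v : Int) : Option Int :=
  if vj < v && m.all (fun mv => decide (v < mv)) then some v else m

def pvScan (u : List Int) (pos : List Int) (vj : Int) : Nat → Option Int → List Int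
  | 0, _ => []
  | i + 1, m =>
    let vi := u.getD i 0
    (if pos.contains ((i : Nat) : Int) && decide (vj ≤ vi) && m.all (fun mv => decide (vi ≤ mv))
     then [((i : Nat) : Int)] else [])
      ++ pvScan u pos vj i (pvUpd vj m vi)

def pvCovers (orig_perm : List Int) (k : Int) (up_perm : List Int) (last : Int) :
    List (List Int × Int) :=
  let u := if PySem.List.len up_perm < k + 1
    then up_perm ++ PySem.List.pyRange (PySem.List.len up_perm + 1) (k + 3) 1
    else up_perm
  let pos := (PySem.List.pyRange 0 k 1).filter (fun i =>
    PySem.List.pyGetD u i 0 ==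
      (if i < PySem.List.len orig_perm then PySem.List.pyGetD orig_perm i 0 else i + 1))
  if pos.isEmpty then []
  else (PySem.List.pyRange last (PySem.List.len u) 1).flatMap (fun j =>
    let vj := PySem.List.pyGetD u j 0
    (pvScan u pos vj j.toNat none).reverse.map (fun i =>
      let w := PySem.List.pySetD (PySem.List.pySetD u i vj) j (PySem.List.pyGetD u i 0)
      (pvTrim w, j)))

def elem_sym_perms_op_alt (orig_perm : List Int) (p : Int) (k : Int) : List (List Int × Int) :=
  ((PySem.List.pyRange 0 p 1).foldl
    (fun st t =>
      let level' := st.2.flatMap (fun pr => pvCovers orig_perm k pr.1 pr.2)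
      (st.1 ++ level'.map (fun pr => (pr.1, t + 1)), level'))
    ([(orig_perm, 0)], [(orig_perm, k)])).1

-- ===== PRECONDITION & SPEC =====
def Spec_elem_sym_perms_op (orig_perm : List Int) (p : Int) (k : Int) (out : List (List Int × Int)) : Prop := out = elem_sym_perms_op_alt orig_perm p k
instance (orig_perm : List Int) (p : Int) (k : Int) (out : List (List Int × Int)) : Decidable (Spec_elem_sym_perms_op orig_perm p k out) := by unfold Spec_elem_sym_perms_op; infer_instance

-- ===== CLAIM (what is proved, stated in full; the proofs are below) =====
def Claim_equal_elem_sym_perms_op : Prop := ∀ (orig_perm : List Int) (p : Int) (k : Int), Dom_elem_sym_perms_op orig_perm p k → Spec_elem_sym_perms_op orig_perm p k (elem_sym_perms_op orig_perm p k)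


-- ===== LEMMAS AND PROOFS =====

-- minimum (as Option) of the values of u on [a, b) that exceed vj, built with B's update
def pvWmin (u : List Int) (vj : Int) (a b : Nat) : Option Int :=
  if h : a < b then pvUpd vj (pvWmin u vj (a + 1) b) (u.getD a 0) else none
termination_by b - a
decreasing_by omega

lemma map_add_one_pyRange (a b : Int) :
    (PySem.List.pyRange a b 1).map (fun i => i + 1) = PySem.List.pyRange (a + 1) (b + 1) 1 := by
  simp only [PySem.List.pyRange_one, List.map_map]
  have h : (b + 1 - (a + 1)).toNat = (b - a).toNat := by omega
  rw [h]
  apply List.map_congr_left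
  intro x _
  simp
  omega

lemma pvTrimLen_le (w : List Int) (L : Nat) : pvTrimLen w L ≤ L := by
  fun_induction pvTrimLen w L with
  | case1 L h ih => omega
  | case2 L h => omega

lemma getD_dropLast (w : List Int) (i : Nat) (h : i < w.length - 1) :
    w.dropLast.getD i 0 = w.getD i 0 := by
  simp [List.getD, h, List.getElem?_eq_getElem (show i < w.length by omega)]

lemma getD_last_of_ne (w : List Int) (hne : w ≠ []) :
    w.getD (w.length - 1) 0 = PySem.List.pyGetD w (-1) 0 := by
  rw [PySem.List.pyGetD_neg_one (h := hne)]
  simp [List.getD, List.getElem?_eq_getElem (show w.length - 1 < w.length by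
    cases w <;> simp_all), List.getLast_eq_getElem]

lemma pvTrimLen_dropLast (w : List Int) : ∀ (L : Nat), L + 1 ≤ w.length →
    pvTrimLen w.dropLast L = pvTrimLen w L := by
  intro L
  induction L using Nat.strong_induction_on with
  | _ L ih =>
    intro h
    conv_lhs => rw [pvTrimLen]
    conv_rhs => rw [pvTrimLen]
    by_cases h2 : 2 < L
    · rw [getD_dropLast w (L - 1) (by omega)]
      split
      · exact ih (L - 1) (by omega) (by omega)
      · rfl
    · rw [dif_neg (by omega), dif_neg (by omega)]

lemma pvTrimLen_fix (w : List Int)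
    (h : ¬(2 < w.length ∧ PySem.List.pyGetD w (-1) 0 = (w.length : Int))) :
    pvTrimLen w w.length = w.length := by
  rw [pvTrimLen]
  rw [dif_neg]
  intro hc
  by_cases h2 : 2 < w.length
  · have hne : w ≠ [] := by intro e; rw [e] at h2; simp at h2
    rw [getD_last_of_ne w hne] at hc
    exact h ⟨h2, hc.2⟩
  · omega

lemma pvTrim_eq (w : List Int) : pvPermtrim w = pvTrim w := by
  fun_induction pvPermtrim w with
  | case1 w h ih =>
    rw [ih, pvTrim, pvTrim]
    have hne : w ≠ [] := by intro e; rw [e] at h; simp at h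
    have hv : w.getD (w.length - 1) 0 = (w.length : Int) := by
      rw [getD_last_of_ne w hne]; exact h.2
    have h2 : pvTrimLen w w.length = pvTrimLen w (w.length - 1) := by
      rw [pvTrimLen, dif_pos ⟨h.1, hv⟩]
    have hlen : w.dropLast.length = w.length - 1 := by simp
    rw [h2, hlen, pvTrimLen_dropLast w (w.length - 1) (by omega)]
    have hle : pvTrimLen w (w.length - 1) ≤ w.length - 1 := pvTrimLen_le _ _
    rw [List.dropLast_eq_take, List.take_take]
    congr 1
    omega
  | case2 w h =>
    rw [pvTrim, pvTrimLen_fix w h, List.take_length]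

lemma pvWmin_all (u : List Int) (vj vi : Int) (a b : Nat) :
    ((pvWmin u vj a b).all fun mv => decide (vi ≤ mv))
      = (PySem.List.pyRange (a : Int) (b : Int) 1).all (fun q =>
          !(decide (PySem.List.pyGetD u q 0 < vi) &&
            decide (vj < PySem.List.pyGetD u q 0))) := by
  fun_induction pvWmin u vj a b with
  | case1 a hab ih =>
    rw [PySem.List.pyRange_one_cons (by exact_mod_cast hab), List.all_cons]
    push_cast at ih ⊢
    rw [← ih, PySem.List.pyGetD_natCast]
    clear ih
    rw [show ∀ x y : Bool, (x = y) ↔ ((x = true) ↔ (y = true)) from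
      fun x y => by cases x <;> cases y <;> simp]
    unfold pvUpd
    rcases hm : pvWmin u vj (a + 1) b with _ | mv <;>
      split <;> rename_i hc <;>
      simp only [Option.all_none, Option.all_some, Bool.and_eq_true,
        Bool.and_true, decide_eq_true_eq, Bool.not_and, Bool.or_eq_true,
        Bool.not_eq_true', decide_eq_false_iff_not, not_lt, true_iff,
        not_and] at hc ⊢ <;>
      omega
  | case2 a hab =>
    rw [PySem.List.pyRange_one_eq_nil (by exact_mod_cast Nat.le_of_not_lt hab)]
    simp

lemma hit_eq (u pos : List Int) (i jn : Nat) :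
    (pos.contains ((i : Nat) : Int) && decide (u.getD jn 0 ≤ u.getD i 0) &&
      ((pvWmin u (u.getD jn 0) (i + 1) jn).all fun mv => decide (u.getD i 0 ≤ mv)))
    = (pos.contains ((i : Nat) : Int) && pvHBD u (i : Int) (jn : Int)) := by
  unfold pvHBD
  have hw := pvWmin_all u (u.getD jn 0) (u.getD i 0) (i + 1) jn
  push_cast at hw ⊢
  rw [PySem.List.pyGetD_natCast, PySem.List.pyGetD_natCast, hw]
  by_cases hlt : u.getD i 0 < u.getD jn 0
  · have h2 : ¬(u.getD jn 0 ≤ u.getD i 0) := by omega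
    simp only [List.getD] at h2 hlt
    simp [hlt, h2]
  · have h2 : u.getD jn 0 ≤ u.getD i 0 := by omega
    simp only [List.getD] at h2 hlt
    simp [hlt, h2]

lemma pvScan_eq (u pos : List Int) (jn : Nat) (i : Nat) (hij : i ≤ jn) :
    (pvScan u pos (u.getD jn 0) i (pvWmin u (u.getD jn 0) i jn)).reverse
      = (PySem.List.pyRange 0 (i : Int) 1).filter
          (fun x => pos.contains x && pvHBD u x (jn : Int)) := by
  induction i with
  | zero => simp [pvScan]
  | succ i ih =>
    rw [pvScan]
    have hm : pvUpd (u.getD jn 0) (pvWmin u (u.getD jn 0) (i + 1) jn) (u.getD i 0)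
        = pvWmin u (u.getD jn 0) i jn := by
      conv_rhs => rw [pvWmin]
      rw [dif_pos (show i < jn by omega)]
    rw [hm, List.reverse_append, ih (by omega)]
    have hr : (PySem.List.pyRange 0 ((i : Int) + 1) 1)
        = PySem.List.pyRange 0 (i : Int) 1 ++ [(i : Int)] :=
      PySem.List.pyRange_one_succ_right (by positivity)
    push_cast
    rw [hr, List.filter_append]
    congr 1
    rw [List.filter_singleton, ← hit_eq u pos i jn]
    split <;> rename_i hc
    · rw [hc]; rfl
    · rw [Bool.not_eq_true] at hc
      rw [hc]; rfl

lemma filter_pos_range (k : Int) (jn : Nat) (phi psi : Int → Bool) (hk : 0 ≤ k)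
    (hkj : k ≤ (jn : Int)) :
    (PySem.List.pyRange 0 (jn : Int) 1).filter
        (fun x => ((PySem.List.pyRange 0 k 1).filter phi).contains x && psi x)
      = ((PySem.List.pyRange 0 k 1).filter phi).filter psi := by
  rw [PySem.List.pyRange_one_append 0 k (jn : Int) hk hkj, List.filter_append]
  have h2 : (PySem.List.pyRange k (jn : Int) 1).filter
      (fun x => ((PySem.List.pyRange 0 k 1).filter phi).contains x && psi x) = [] := by
    rw [List.filter_eq_nil_iff]
    intro x hx
    have hxk : k ≤ x := (PySem.List.mem_pyRange_one.mp hx).1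
    simp
    exact fun _ h2 _ => absurd h2 (by omega)
  rw [h2, List.append_nil]
  have h3 : ∀ x ∈ PySem.List.pyRange 0 k 1,
      (((PySem.List.pyRange 0 k 1).filter phi).contains x && psi x) = (phi x && psi x) := by
    intro x hx
    by_cases hphi : phi x = true
    · have hc : ((PySem.List.pyRange 0 k 1).filter phi).contains x = true := by
        simp [List.mem_filter, hx, hphi]
      rw [hc, hphi]
    · have hc : ((PySem.List.pyRange 0 k 1).filter phi).contains x = false := by
        simp [List.mem_filter, hphi]
      rw [hc, Bool.eq_false_iff.mpr hphi]
  rw [List.filter_congr h3, List.filter_filter]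
  apply List.filter_congr
  intro x hx
  rw [Bool.and_comm]

lemma foldl_pair {a b : Type} (l : List a) (c : a → Bool) (f g : a → b) (T P : List b) :
    l.foldl (fun acc x => if c x then (acc.1 ++ [f x], acc.2 ++ [g x]) else acc) (T, P)
      = (T ++ (l.filter c).map f, P ++ (l.filter c).map g) := by
  induction l generalizing T P with
  | nil => simp
  | cons x xs ih =>
    simp only [List.foldl_cons, List.filter_cons]
    by_cases hc : c x
    · simp [hc, ih]
    · simp [hc, ih]

-- B's per-column cover list, as it appears (zeta-reduced) inside pvCovers
def pvBody (u pos : List Int) (j : Int) : List (List Int × Int) :=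
  (pvScan u pos (PySem.List.pyGetD u j 0) j.toNat none).reverse.map (fun i =>
    (pvTrim (PySem.List.pySetD (PySem.List.pySetD u i (PySem.List.pyGetD u j 0)) j
      (PySem.List.pyGetD u i 0)), j))

lemma perj (u pos : List Int) (k pp : Int) (phi : Int → Bool)
    (hpos : pos = (PySem.List.pyRange 0 k 1).filter phi) (hk : 0 < k)
    (j : Int) (hj : k ≤ j) (T P : List (List Int × Int)) :
    pos.foldl (fun acc3 i =>
        if pvHBD u i j then
          (acc3.1 ++ [(pvPermtrim (PySem.List.pySetD
              (PySem.List.pySetD u i (PySem.List.pyGetD u j 0)) j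
              (PySem.List.pyGetD u i 0)), pp + 1)],
           acc3.2 ++ [(pvPermtrim (PySem.List.pySetD
              (PySem.List.pySetD u i (PySem.List.pyGetD u j 0)) j
              (PySem.List.pyGetD u i 0)), j)])
        else acc3) (T, P)
      = (T ++ (pvBody u pos j).map (fun pr => (pr.1, pp + 1)), P ++ pvBody u pos j) := by
  rw [foldl_pair pos (fun i => pvHBD u i j)
    (fun i => (pvPermtrim (PySem.List.pySetD
        (PySem.List.pySetD u i (PySem.List.pyGetD u j 0)) j
        (PySem.List.pyGetD u i 0)), pp + 1))
    (fun i => (pvPermtrim (PySem.List.pySetD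
        (PySem.List.pySetD u i (PySem.List.pyGetD u j 0)) j
        (PySem.List.pyGetD u i 0)), j)) T P]
  have hj0 : (j.toNat : Int) = j := Int.toNat_of_nonneg (by omega)
  have hnone : pvWmin u (u.getD j.toNat 0) j.toNat j.toNat = none := by
    rw [pvWmin, dif_neg (lt_irrefl _)]
  have hg : PySem.List.pyGetD u j 0 = u.getD j.toNat 0 := by
    conv_lhs => rw [← hj0]
    rw [PySem.List.pyGetD_natCast]
  have hfil : pos.filter (fun i => pvHBD u i j)
      = (pvScan u pos (PySem.List.pyGetD u j 0) j.toNat none).reverse := by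
    have hs := pvScan_eq u pos j.toNat j.toNat le_rfl
    rw [hnone, hj0] at hs
    rw [← hg] at hs
    have hfp := filter_pos_range k j.toNat phi (fun x => pvHBD u x j) (by omega) (by omega)
    rw [hj0, ← hpos] at hfp
    beta_reduce at hfp
    rw [hs, hfp]
  rw [hfil, Prod.mk.injEq]
  unfold pvBody
  rw [List.map_map]
  constructor <;> (congr 1; apply List.map_congr_left; intro i _; simp [pvTrim_eq])

lemma jloop (u pos : List Int) (k pp : Int) (phi : Int → Bool)
    (hpos : pos = (PySem.List.pyRange 0 k 1).filter phi) (hk : 0 < k)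
    (J : List Int) (hJ : ∀ j ∈ J, k ≤ j) (T P : List (List Int × Int)) :
    J.foldl (fun acc2 j => pos.foldl (fun acc3 i =>
        if pvHBD u i j then
          (acc3.1 ++ [(pvPermtrim (PySem.List.pySetD
              (PySem.List.pySetD u i (PySem.List.pyGetD u j 0)) j
              (PySem.List.pyGetD u i 0)), pp + 1)],
           acc3.2 ++ [(pvPermtrim (PySem.List.pySetD
              (PySem.List.pySetD u i (PySem.List.pyGetD u j 0)) j
              (PySem.List.pyGetD u i 0)), j)])
        else acc3) acc2) (T, P)
      = (T ++ (J.flatMap (pvBody u pos)).map (fun pr => (pr.1, pp + 1)),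
         P ++ J.flatMap (pvBody u pos)) := by
  induction J generalizing T P with
  | nil => simp
  | cons j J ih =>
    rw [List.foldl_cons, perj u pos k pp phi hpos hk j (hJ j (by simp)) T P,
      ih (fun x hx => hJ x (by simp [hx]))]
    simp [List.map_append]

lemma stepA_entry (orig : List Int) (k pp : Int) (T P : List (List Int × Int))
    (u0 : List Int) (last : Int) (hkl : k ≤ last) :
    pvStepA orig k pp (T, P) (u0, last)
      = (T ++ (pvCovers orig k u0 last).map (fun pr => (pr.1, pp + 1)),
         P ++ pvCovers orig k u0 last) := by
  simp only [pvStepA, pvCovers]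
  rw [show (k : Int) + 3 = k + 2 + 1 by ring, ← map_add_one_pyRange (PySem.List.len u0) (k + 2)]
  set u := if PySem.List.len u0 < k + 1
    then u0 ++ (PySem.List.pyRange (PySem.List.len u0) (k + 2) 1).map (fun i => i + 1)
    else u0 with hu
  have hlen : ¬ (PySem.List.len u0 < k + 1) ∨ k + 1 ≤ PySem.List.len u := by
    by_cases hc : PySem.List.len u0 < k + 1
    · right
      rw [hu, if_pos hc]
      simp only [PySem.List.len_eq, List.length_append, PySem.List.length_pyRange_one,
        List.length_map]
      push_cast [PySem.List.len_eq] at hc ⊢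
      omega
    · left; exact hc
  have hlen2 : k ≤ 0 ∨ k + 1 ≤ PySem.List.len u := by
    rcases hlen with hc | hc
    · by_cases hk0 : k ≤ 0
      · left; exact hk0
      · right; rw [hu, if_neg hc]; omega
    · right; exact hc
  have hposeq : (PySem.List.pyRange 0 k 1).filter
        (fun i => pvGetpermval u i == pvGetpermval orig i)
      = (PySem.List.pyRange 0 k 1).filter (fun i =>
          PySem.List.pyGetD u i 0 ==
            (if i < PySem.List.len orig then PySem.List.pyGetD orig i 0 else i + 1)) := by
    apply List.filter_congr
    intro i hi
    have hik := PySem.List.mem_pyRange_one.mp hi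
    have hiu : i < PySem.List.len u := by rcases hlen2 with hc | hc <;> omega
    simp only [pvGetpermval, if_pos hiu]
  rw [hposeq]
  set pos := (PySem.List.pyRange 0 k 1).filter (fun i =>
      PySem.List.pyGetD u i 0 ==
        (if i < PySem.List.len orig then PySem.List.pyGetD orig i 0 else i + 1)) with hpos
  by_cases hemp : pos = []
  · rw [hemp]
    simp only [List.isEmpty_nil, List.foldl_nil]
    rw [List.foldl_fixed]
    simp
  · have hkpos : 0 < k := by
      rcases List.exists_mem_of_ne_nil pos hemp with ⟨x, hx⟩
      rw [hpos] at hx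
      have := PySem.List.mem_pyRange_one.mp (List.mem_filter.mp hx).1
      omega
    rw [if_neg (by simpa [List.isEmpty_iff] using hemp)]
    rw [jloop u pos k pp _ hpos hkpos _
      (fun j hj => le_trans hkl (PySem.List.mem_pyRange_one.mp hj).1) T P]
    rfl

lemma covers_snd (orig : List Int) (k : Int) (u0 : List Int) (last : Int) :
    ∀ x ∈ pvCovers orig k u0 last, last ≤ x.2 := by
  intro x hx
  simp only [pvCovers] at hx
  generalize (if PySem.List.len u0 < k + 1
      then u0 ++ PySem.List.pyRange (PySem.List.len u0 + 1) (k + 3) 1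
      else u0) = u at hx
  split at hx
  · simp at hx
  · obtain ⟨j, hj, hxm⟩ := List.mem_flatMap.mp hx
    obtain ⟨i, _, rfl⟩ := List.mem_map.mp hxm
    exact (PySem.List.mem_pyRange_one.mp hj).1

lemma level_eq (orig : List Int) (k pp : Int) (L : List (List Int × Int))
    (hL : ∀ x ∈ L, k ≤ x.2) (T P : List (List Int × Int)) :
    L.foldl (pvStepA orig k pp) (T, P)
      = (T ++ (L.flatMap (fun pr => pvCovers orig k pr.1 pr.2)).map (fun pr => (pr.1, pp + 1)),
         P ++ L.flatMap (fun pr => pvCovers orig k pr.1 pr.2)) := by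
  induction L generalizing T P with
  | nil => simp
  | cons pr L ih =>
    obtain ⟨u0, last⟩ := pr
    rw [List.foldl_cons, stepA_entry orig k pp T P u0 last (hL (u0, last) (by simp)),
      ih (fun x hx => hL x (by simp [hx]))]
    simp [List.map_append]

lemma driver_eq (orig : List Int) (k : Int) (R : List Int) (T : List (List Int × Int))
    (L : List (List Int × Int)) (hL : ∀ x ∈ L, k ≤ x.2) :
    R.foldl (fun st pp => st.2.foldl (pvStepA orig k pp) (st.1, [])) (T, L)
      = R.foldl (fun st t =>
          let level' := st.2.flatMap (fun pr => pvCovers orig k pr.1 pr.2)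
          (st.1 ++ level'.map (fun pr => (pr.1, t + 1)), level')) (T, L) := by
  induction R generalizing T L with
  | nil => rfl
  | cons pp R ih =>
    simp only [List.foldl_cons]
    rw [level_eq orig k pp L hL T []]
    rw [List.nil_append]
    exact ih _ _ (fun x hx => by
      obtain ⟨pr, hpr, hxc⟩ := List.mem_flatMap.mp hx
      exact le_trans (hL pr hpr) (covers_snd orig k pr.1 pr.2 x hxc))

-- ===== VERDICT (by name: the statement is the Claim_ definition above) =====
theorem elem_sym_perms_op_spec : Claim_equal_elem_sym_perms_op := by
  intro orig p k _
  unfold Spec_elem_sym_perms_op elem_sym_perms_op elem_sym_perms_op_alt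
  rw [driver_eq orig k _ _ _ (by intro x hx; simp at hx; simp [hx])]
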